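-- pv_equiv track=rewrite | github.com/uqwhua/TEA | load_data.py | transform_triple2seq
-- ===== SOURCE A (Python) =====
-- def transform_triple2seq(att_triples, language, concate_values=False):
--     # ent_id_seq = [ent1_id, ent2_id, ent3_id...]
--     # prop_num = [ent1_num_prop, ent2_num_prop...]
--     # att_id_seq = [[ent1_prop1_id, ent1_prop2_id, ...]...]
--     # value_seq = [[ent1_value1, ent1_value2, ...]...]
--     # Fixme: select the first 20 attributes
--     # Fixme: Original average property number 26 --> only one property average property number 15.9 --> top 20 property 10.09
--     if language in {'zh', 'en', 'ja', 'fr'}: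
--         top_k_att = 20
--     else:
--         top_k_att = 3
--     ent_id_seq = []
--     prop2value_seq = []
--     for ent_id, value, att_id in att_triples:
--         if len(ent_id_seq) == 0:
--             ent_id_seq.append(ent_id)
--             prop2value_seq.append(dict())
--         if ent_id != ent_id_seq[-1]:
--             ent_id_seq.append(ent_id)
--             prop2value_seq.append(dict())
--         if not concate_values:
--             prop2value_seq[-1][att_id] = value
--         else:
--             if att_id in prop2value_seq[-1]:
--                 prop2value_seq[-1][att_id] += '. ' + value
--             else:
--                 prop2value_seq[-1][att_id] = value
--     att_id_seq = []
--     value_seq = []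
--     for prop2value in prop2value_seq:
--         att_ids, values = zip(*list(prop2value.items()))
--         assert len(values) == len(att_ids)
--         att_id_seq.append(att_ids[:top_k_att])
--         value_seq.append(values[:top_k_att])
--     return ent_id_seq, att_id_seq, value_seq
-- ===== SOURCE B (Python) =====
-- def transform_triple2seq(att_triples, language, concate_values=False):
--     # Runs of equal entity ids are located by index scanning; each run's attribute
--     # order is the first-occurrence dedup of its att_ids, and each value is recomputed
--     # per key (last occurrence, or a '. '-join of all occurrences): no dict is built.
--     top_k_att = 20 if language in {'zh', 'en', 'ja', 'fr'} else 3
--     ent_id_seq, att_id_seq, value_seq = [], [], []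
--     i, n = 0, len(att_triples)
--     while i < n:
--         j = i + 1
--         while j < n and att_triples[j][0] == att_triples[i][0]:
--             j += 1
--         run = att_triples[i:j]
--         keys = []
--         for _, _, a in run:
--             if a not in keys:
--                 keys.append(a)
--         keys = keys[:top_k_att]
--         if concate_values:
--             vals = tuple('. '.join(v for _, v, a in run if a == k) for k in keys)
--         else:
--             vals = tuple(next(v for _, v, a in reversed(run) if a == k) for k in keys)
--         ent_id_seq.append(run[0][0])
--         att_id_seq.append(tuple(keys))
--         value_seq.append(vals)
--         i = j
--     return ent_id_seq, att_id_seq, value_seq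
-- ===== Notes on version B (the rewrite author's own statement) =====
-- stated objective: alternative
-- what changed: Instead of A's fold that tracks ent_id_seq[-1] and mutates the last dict in a growing list of dicts (then a second loop unzipping every dict's items), B builds no dict at all: it segments consecutive same-entity runs by index, dedups each run's att_ids by first occurrence, and recomputes each value per key directly from the run (last occurrence, or a '. '-join of all occurrences when concate_values).
import Mathlib
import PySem

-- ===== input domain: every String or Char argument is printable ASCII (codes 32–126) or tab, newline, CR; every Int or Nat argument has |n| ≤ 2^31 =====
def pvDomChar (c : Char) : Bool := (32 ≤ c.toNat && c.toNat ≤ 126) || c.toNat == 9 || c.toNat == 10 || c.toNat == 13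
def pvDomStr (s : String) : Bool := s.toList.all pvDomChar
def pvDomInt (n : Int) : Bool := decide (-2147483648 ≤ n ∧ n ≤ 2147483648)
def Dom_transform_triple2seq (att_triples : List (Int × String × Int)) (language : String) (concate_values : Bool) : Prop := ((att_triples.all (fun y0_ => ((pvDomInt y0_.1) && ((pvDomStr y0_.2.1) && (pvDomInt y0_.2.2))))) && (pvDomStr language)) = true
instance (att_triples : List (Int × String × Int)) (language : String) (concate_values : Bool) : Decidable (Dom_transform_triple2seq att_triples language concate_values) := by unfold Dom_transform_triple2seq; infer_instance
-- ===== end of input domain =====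

-- B replaces A's fold-over-a-list-of-dicts (plus a second unzip loop) by index-based run
-- segmentation that builds no dict: per run it dedups the att_ids and recomputes each value
-- per key (last occurrence, or a '. '-join of all occurrences); objective: alternative.

-- ===== PORT A =====
-- dict-update of A's inner loop, A's branch order (not concate / key present / absent)
def pvUpdA (concate_values : Bool) (d : PySem.Dict Int String) (att_id : Int) (value : String) : PySem.Dict Int String :=
  if !concate_values then d.insert att_id value
  else if d.contains att_id then d.insert att_id (d.getD att_id "" ++ ". " ++ value)
  else d.insert att_id value

-- prop2value_seq[-1][...] = ... : modify the last element of the list in place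
def pvModLast {alpha : Type} (f : alpha → alpha) : List alpha → List alpha
  | [] => []
  | [d] => [f d]
  | d :: d' :: rest => d :: pvModLast f (d' :: rest)

def pvStepA (concate_values : Bool) (st : List Int × List (PySem.Dict Int String))
    (t : Int × String × Int) : List Int × List (PySem.Dict Int String) :=
  let st := if st.1.length == 0 then (st.1 ++ [t.1], st.2 ++ [PySem.Dict.empty]) else st
  let st := if PySem.List.pyGet? st.1 (-1) ≠ some t.1 then (st.1 ++ [t.1], st.2 ++ [PySem.Dict.empty]) else st
  (st.1, pvModLast (fun d => pvUpdA concate_values d t.2.2 t.2.1) st.2)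

def transform_triple2seq (att_triples : List (Int × String × Int)) (language : String) (concate_values : Bool) : List Int × List (List Int) × List (List String) :=
  let top_k_att : Nat := if language ∈ (["zh", "en", "ja", "fr"] : List String) then 20 else 3
  let st := att_triples.foldl (pvStepA concate_values) ([], [])
  -- zip(*list(d.items())) = (keys in order, values in order); every dict built above is
  -- nonempty, so the ValueError branch of the unpacking is unreachable; [:top_k_att] = take (top_k_att ≥ 0)
  let fin := st.2.foldl (fun acc d =>
      (acc.1 ++ [(d.items.map Prod.fst).take top_k_att], acc.2 ++ [(d.items.map Prod.snd).take top_k_att])) ([], [])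
  (st.1, fin.1, fin.2)

-- ===== PORT B =====
-- the inner 'while j < n' scan: the consecutive run of triples with entity id e, and the remainder
def pvRun (e : Int) : List (Int × String × Int) → List (Int × String × Int) × List (Int × String × Int)
  | [] => ([], [])
  | t :: rest => if t.1 == e then (let p := pvRun e rest; (t :: p.1, p.2)) else ([], t :: rest)

lemma pvRun_snd_length_le (e : Int) (ts : List (Int × String × Int)) :
    (pvRun e ts).2.length ≤ ts.length := by
  induction ts with
  | nil => simp [pvRun]
  | cons t rest ih =>
    by_cases h : t.1 == e <;> simp [pvRun, h] <;> omega

-- the keys loop: 'if a not in keys: keys.append(a)'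
def pvKeysB (run : List (Int × String × Int)) : List Int :=
  run.foldl (fun ks t => if ks.contains t.2.2 then ks else ks ++ [t.2.2]) []

-- one value: '. '.join of all occurrences of k, or next(...) over the reversed run
-- (k is drawn from the run, so the search succeeds; the .getD "" default is unreachable)
def pvValB (cv : Bool) (run : List (Int × String × Int)) (k : Int) : String :=
  if cv then PySem.Str.join ". " ((run.filter (fun t => t.2.2 == k)).map (fun t => t.2.1))
  else ((run.reverse.find? (fun t => t.2.2 == k)).map (fun t => t.2.1)).getD ""

def pvGoB (cv : Bool) (topk : Nat) : List (Int × String × Int) → List Int × List (List Int) × List (List String)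
  | [] => ([], [], [])
  | t :: rest =>
    let p := pvRun t.1 rest
    let run := t :: p.1
    let keys := (pvKeysB run).take topk
    let out := pvGoB cv topk p.2
    (t.1 :: out.1, keys :: out.2.1, (keys.map (pvValB cv run)) :: out.2.2)
termination_by ts => ts.length
decreasing_by exact Nat.lt_succ_of_le (pvRun_snd_length_le _ _)

def transform_triple2seq_alt (att_triples : List (Int × String × Int)) (language : String) (concate_values : Bool) : List Int × List (List Int) × List (List String) :=
  let top_k_att : Nat := if language ∈ (["zh", "en", "ja", "fr"] : List String) then 20 else 3
  pvGoB concate_values top_k_att att_triples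

-- ===== PRECONDITION & SPEC =====
def Spec_transform_triple2seq (att_triples : List (Int × String × Int)) (language : String) (concate_values : Bool) (out : List Int × List (List Int) × List (List String)) : Prop := out = transform_triple2seq_alt att_triples language concate_values
instance (att_triples : List (Int × String × Int)) (language : String) (concate_values : Bool) (out : List Int × List (List Int) × List (List String)) : Decidable (Spec_transform_triple2seq att_triples language concate_values out) := by unfold Spec_transform_triple2seq; infer_instance

-- ===== CLAIM (what is proved, stated in full; the proofs are below) =====
def Claim_equal_transform_triple2seq : Prop := ∀ (att_triples : List (Int × String × Int)) (language : String) (concate_values : Bool), Dom_transform_triple2seq att_triples language concate_values → Spec_transform_triple2seq att_triples language concate_values (transform_triple2seq att_triples language concate_values)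

-- ===== LEMMAS AND PROOFS =====

-- A's per-triple dict update, seen on whole triples
def pvUpd (cv : Bool) (d : PySem.Dict Int String) (t : Int × String × Int) : PySem.Dict Int String :=
  pvUpdA cv d t.2.2 t.2.1

-- the value pvUpd inserts (pvUpd always inserts at key t.2.2)
def pvNewV (cv : Bool) (d : PySem.Dict Int String) (t : Int × String × Int) : String :=
  if !cv then t.2.1
  else if d.contains t.2.2 then d.getD t.2.2 "" ++ ". " ++ t.2.1
  else t.2.1

lemma pvUpd_eq_insert (cv : Bool) :
    pvUpd cv = fun d t => d.insert t.2.2 (pvNewV cv d t) := by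
  funext d t
  cases cv <;> by_cases h : d.contains t.2.2 <;> simp [pvUpd, pvUpdA, pvNewV, h]

-- proof skeleton of A: per-run list of dicts
def pvGoP (cv : Bool) : List (Int × String × Int) → List Int × List (PySem.Dict Int String)
  | [] => ([], [])
  | t :: rest =>
    let p := pvRun t.1 rest
    let out := pvGoP cv p.2
    (t.1 :: out.1, ((t :: p.1).foldl (pvUpd cv) PySem.Dict.empty) :: out.2)
termination_by ts => ts.length
decreasing_by exact Nat.lt_succ_of_le (pvRun_snd_length_le _ _)

lemma pvModLast_append {alpha : Type} (f : alpha → alpha) (ds : List alpha) (d : alpha) :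
    pvModLast f (ds ++ [d]) = ds ++ [f d] := by
  induction ds with
  | nil => rfl
  | cons x xs ih =>
    cases xs with
    | nil => rfl
    | cons y ys => simpa [pvModLast] using ih

lemma pvFoldA_runs (cv : Bool) (ts : List (Int × String × Int)) :
    ∀ (es : List Int) (ds : List (PySem.Dict Int String)) (e : Int) (d : PySem.Dict Int String),
    ts.foldl (pvStepA cv) (es ++ [e], ds ++ [d]) =
      (es ++ e :: (pvGoP cv (pvRun e ts).2).1,
       ds ++ (((pvRun e ts).1).foldl (pvUpd cv) d) :: (pvGoP cv (pvRun e ts).2).2) := by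
  induction ts with
  | nil => intro es ds e d; simp [pvRun, pvGoP]
  | cons t rest ih =>
    intro es ds e d
    obtain ⟨e2, v, a⟩ := t
    by_cases h : e2 = e
    · subst h
      have hstep : pvStepA cv (es ++ [e2], ds ++ [d]) (e2, v, a)
          = (es ++ [e2], ds ++ [pvUpd cv d (e2, v, a)]) := by
        simp [pvStepA, pvModLast_append, pvUpd]
      rw [List.foldl_cons, hstep, ih es ds e2 (pvUpd cv d (e2, v, a))]
      simp [pvRun]
    · have hstep : pvStepA cv (es ++ [e], ds ++ [d]) (e2, v, a)
          = ((es ++ [e]) ++ [e2], (ds ++ [d]) ++ [pvUpd cv PySem.Dict.empty (e2, v, a)]) := by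
        have h' : ¬ e = e2 := fun he => h he.symm
        rw [show (ds ++ [d]) ++ [pvUpd cv PySem.Dict.empty (e2, v, a)]
              = ds ++ [d, pvUpd cv PySem.Dict.empty (e2, v, a)] by simp]
        simp [pvStepA, h', pvUpd]
        rw [show ds ++ [d, PySem.Dict.empty] = (ds ++ [d]) ++ [PySem.Dict.empty] by simp,
          pvModLast_append]
        simp
      rw [List.foldl_cons, hstep, ih (es ++ [e]) (ds ++ [d]) e2 (pvUpd cv PySem.Dict.empty (e2, v, a))]
      have hne : (e2 == e) = false := by simp [h]
      simp [pvRun, hne, pvGoP]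

-- keys of a run dict = B's dedupe loop
lemma keys_run_dict (cv : Bool) (run : List (Int × String × Int)) :
    (run.foldl (pvUpd cv) PySem.Dict.empty).keys = pvKeysB run := by
  rw [pvUpd_eq_insert]
  rw [PySem.Dict.keys_foldl_insert_key run (fun t => t.2.2) (pvNewV cv) PySem.Dict.empty]
  simp [PySem.Dict.keys_empty, PySem.Set.update, PySem.Set.add, PySem.Set.contains,
    List.foldl_map, pvKeysB]

lemma nodup_keys_run_dict (cv : Bool) (run : List (Int × String × Int)) :
    (run.foldl (pvUpd cv) PySem.Dict.empty).keys.Nodup := by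
  rw [pvUpd_eq_insert]
  exact PySem.Dict.nodup_keys_foldl_insert_key run (fun t => t.2.2) (pvNewV cv) PySem.Dict.empty
    (by simp [PySem.Dict.keys_empty])

-- getD of the fold, non-concatenating case: the LAST occurrence's value
lemma getD_fold_false (ps : List (Int × String × Int)) (d : PySem.Dict Int String) (kk : Int) :
    (ps.foldl (pvUpd false) d).getD kk "" =
      (((ps.reverse.find? (fun t => t.2.2 == kk)).map (fun t => t.2.1)).getD (d.getD kk "")) := by
  induction ps using List.reverseRecOn with
  | nil => simp
  | append_singleton l a ih =>
    have hupd : pvUpd false (l.foldl (pvUpd false) d) a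
        = (l.foldl (pvUpd false) d).insert a.2.2 a.2.1 := by simp [pvUpd, pvUpdA]
    rw [List.foldl_append, List.foldl_cons, List.foldl_nil, hupd, PySem.Dict.getD_insert]
    by_cases h : kk = a.2.2
    · simp [h]
    · have hne : ¬ a.2.2 = kk := fun he => h he.symm
      have h2 : (a.2.2 == kk) = false := by simp [hne]
      simp [h, h2, ih]

-- glue accumulator of the concatenating case
def pvJ : List String → String
  | [] => ""
  | v :: r => r.foldl (fun s w => s ++ ". " ++ w) v

lemma pvJ_append (l : List String) (v : String) (h : l ≠ []) :
    pvJ (l ++ [v]) = pvJ l ++ ". " ++ v := by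
  cases l with
  | nil => simp at h
  | cons a r => simp [pvJ, List.foldl_append]

-- membership in the run dict's keys
lemma contains_run_dict (cv : Bool) (ps : List (Int × String × Int)) (kk : Int) :
    (ps.foldl (pvUpd cv) PySem.Dict.empty).contains kk
      = decide (kk ∈ ps.map (fun t => t.2.2)) := by
  rw [PySem.Dict.contains_eq_decide_mem_keys, pvUpd_eq_insert,
    PySem.Dict.keys_foldl_insert_key ps (fun t => t.2.2) (pvNewV cv) PySem.Dict.empty]
  simp [PySem.Dict.keys_empty]

-- getD of the fold, concatenating case: glue of ALL occurrences' values
lemma getD_fold_true (ps : List (Int × String × Int)) (kk : Int) :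
    (ps.foldl (pvUpd true) PySem.Dict.empty).getD kk "" =
      pvJ ((ps.filter (fun t => t.2.2 == kk)).map (fun t => t.2.1)) := by
  induction ps using List.reverseRecOn with
  | nil => simp [pvJ]
  | append_singleton l a ih =>
    rw [List.foldl_append, List.foldl_cons, List.foldl_nil]
    by_cases h : a.2.2 = kk
    · subst h
      have hc : (l.foldl (pvUpd true) PySem.Dict.empty).contains a.2.2
          = decide (a.2.2 ∈ l.map (fun t => t.2.2)) := contains_run_dict true l a.2.2
      by_cases hmem : a.2.2 ∈ l.map (fun t => t.2.2)
      · have hocc : (l.filter (fun t => t.2.2 == a.2.2)).map (fun t => t.2.1) ≠ [] := by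
          simp only [ne_eq, List.map_eq_nil_iff, List.filter_eq_nil_iff, not_forall]
          obtain ⟨t, ht, hteq⟩ := List.mem_map.mp hmem
          exact ⟨t, ht, by simp [hteq]⟩
        have hu : pvUpd true (l.foldl (pvUpd true) PySem.Dict.empty) a
            = (l.foldl (pvUpd true) PySem.Dict.empty).insert a.2.2
                ((l.foldl (pvUpd true) PySem.Dict.empty).getD a.2.2 "" ++ ". " ++ a.2.1) := by
          simp [pvUpd, pvUpdA, hc, hmem]
        rw [hu, PySem.Dict.getD_insert, if_pos rfl, ih,
          List.filter_append, List.map_append]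
        have hfa : (([a].filter (fun t => t.2.2 == a.2.2)).map (fun t => t.2.1)) = [a.2.1] := by
          simp
        rw [hfa, pvJ_append _ _ hocc]
      · have hocc : (l.filter (fun t => t.2.2 == a.2.2)).map (fun t => t.2.1) = [] := by
          simp only [List.map_eq_nil_iff, List.filter_eq_nil_iff]
          intro t ht hteq
          exact hmem (List.mem_map.mpr ⟨t, ht, by simpa using hteq⟩)
        have hu : pvUpd true (l.foldl (pvUpd true) PySem.Dict.empty) a
            = (l.foldl (pvUpd true) PySem.Dict.empty).insert a.2.2 a.2.1 := by
          simp [pvUpd, pvUpdA, hc, hmem]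
        rw [hu, PySem.Dict.getD_insert, if_pos rfl, List.filter_append, List.map_append, hocc]
        simp [pvJ]
    · have hne : ¬ kk = a.2.2 := fun he => h he.symm
      have h2 : (a.2.2 == kk) = false := by simp [h]
      have hu : pvUpd true (l.foldl (pvUpd true) PySem.Dict.empty) a
          = (l.foldl (pvUpd true) PySem.Dict.empty).insert a.2.2
              (pvNewV true (l.foldl (pvUpd true) PySem.Dict.empty) a) := by
        rw [pvUpd_eq_insert]
      rw [hu, PySem.Dict.getD_insert, if_neg hne, List.filter_append, List.map_append]
      simp [h2, ih]

lemma pyjoin_cc (v b : String) (r : List String) :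
    PySem.Str.join ". " (v :: b :: r) = v ++ ". " ++ PySem.Str.join ". " (b :: r) := by
  have hof : ∀ x : List Char, String.ofList ('.' :: ' ' :: x) = ". " ++ String.ofList x := by
    intro x
    rw [show ('.' :: ' ' :: x) = ['.', ' '] ++ x from rfl, String.ofList_append]
  simp [PySem.Str.join, PySem.Chars.join, List.intercalate, String.ofList_append, hof,
    String.append_assoc]

lemma pyjoin_single (x : String) : PySem.Str.join ". " [x] = x := by
  simp [PySem.Str.join, PySem.Chars.join, List.intercalate, String.ofList_toList]

lemma pvJ_eq_join (l : List String) : pvJ l = PySem.Str.join ". " l := by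
  cases l with
  | nil => rfl
  | cons v r =>
    induction r generalizing v with
    | nil => simp [pvJ, pyjoin_single]
    | cons b r ih =>
      have h1 : pvJ (v :: b :: r) = pvJ ((v ++ ". " ++ b) :: r) := by simp [pvJ]
      rw [h1, ih]
      cases r with
      | nil => simp [pyjoin_single, pyjoin_cc]
      | cons c r' => rw [pyjoin_cc, pyjoin_cc v b, pyjoin_cc b c]; simp [String.append_assoc]

-- the run dict's getD IS B's per-key value
lemma getD_run_dict (cv : Bool) (run : List (Int × String × Int)) (kk : Int) :
    (run.foldl (pvUpd cv) PySem.Dict.empty).getD kk "" = pvValB cv run kk := by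
  cases cv with
  | false => rw [getD_fold_false]; simp [pvValB]
  | true => rw [getD_fold_true]; simp [pvValB, pvJ_eq_join]

-- B computes exactly the (truncated) items of the run dicts of pvGoP
lemma pvGoB_eq_pvGoP (cv : Bool) (k : Nat) (ts : List (Int × String × Int)) :
    pvGoB cv k ts = ((pvGoP cv ts).1,
      ((pvGoP cv ts).2).map (fun d => (d.items.map Prod.fst).take k),
      ((pvGoP cv ts).2).map (fun d => (d.items.map Prod.snd).take k)) := by
  induction hn : ts.length using Nat.strong_induction_on generalizing ts with
  | _ n ihn =>
    cases ts with
    | nil => simp [pvGoB, pvGoP]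
    | cons t rest =>
      have hr : (pvRun t.1 rest).2.length < n := by
        have := pvRun_snd_length_le t.1 rest
        simp at hn; omega
      have hkeys : ((t :: (pvRun t.1 rest).1).foldl (pvUpd cv) PySem.Dict.empty).items.map Prod.fst
          = pvKeysB (t :: (pvRun t.1 rest).1) := keys_run_dict cv _
      have hvals : (((t :: (pvRun t.1 rest).1).foldl (pvUpd cv) PySem.Dict.empty).items.map Prod.snd).take k
          = ((pvKeysB (t :: (pvRun t.1 rest).1)).take k).map (pvValB cv (t :: (pvRun t.1 rest).1)) := by
        have h0 : ((t :: (pvRun t.1 rest).1).foldl (pvUpd cv) PySem.Dict.empty).items.map Prod.snd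
            = ((t :: (pvRun t.1 rest).1).foldl (pvUpd cv) PySem.Dict.empty).values := rfl
        rw [h0, PySem.Dict.values_eq_map_keys _ (nodup_keys_run_dict cv _) "",
          keys_run_dict cv _, ← List.map_take]
        exact List.map_congr_left (fun kk _ => getD_run_dict cv _ kk)
      rw [pvGoB, pvGoP]
      simp only [ihn _ hr _ rfl]
      rw [List.foldl_cons] at hkeys hvals
      simp [hkeys, hvals]
lemma pvFoldPair_eq_map {alpha beta gamma : Type} (f : alpha → beta) (g : alpha → gamma)
    (ds : List alpha) : ∀ (acc1 : List beta) (acc2 : List gamma),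
    ds.foldl (fun acc d => (acc.1 ++ [f d], acc.2 ++ [g d])) (acc1, acc2)
      = (acc1 ++ ds.map f, acc2 ++ ds.map g) := by
  induction ds with
  | nil => simp
  | cons d ds ih => intro acc1 acc2; simp [ih]

-- ===== VERDICT (by name: the statement is the Claim_ definition above) =====
theorem transform_triple2seq_spec : Claim_equal_transform_triple2seq := by
  intro ts language cv _
  unfold Spec_transform_triple2seq transform_triple2seq transform_triple2seq_alt
  rw [pvGoB_eq_pvGoP]
  have hst : ts.foldl (pvStepA cv) ([], []) = pvGoP cv ts := by
    cases ts with
    | nil => simp [pvGoP]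
    | cons t rest =>
      obtain ⟨e, v, a⟩ := t
      have hstep : pvStepA cv ([], []) (e, v, a)
          = (([] : List Int) ++ [e], ([] : List (PySem.Dict Int String)) ++ [pvUpd cv PySem.Dict.empty (e, v, a)]) := by
        simp [pvStepA, pvModLast, pvUpd, PySem.List.pyGet?, PySem.List.pyIdx?]
      rw [List.foldl_cons, hstep, pvFoldA_runs]
      rw [pvGoP]
      simp
  rw [hst]
  simp only [pvFoldPair_eq_map]
  simp
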